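-- pv_equiv track=rewrite | github.com/zylamarek/dataset-tools | operations/functions/function.py | fix_meta_sequence
-- ===== SOURCE A (Python) =====
-- def fix_meta_sequence(metas):
--     prev_meta = None
--     for i in range(len(metas)):
--         if metas[i] is None:
--             metas[i] = prev_meta
--         prev_meta = metas[i]
--
--     prev_meta = None
--     for i in range(len(metas) - 1, -1, -1):
--         if metas[i] is None:
--             metas[i] = prev_meta
--         prev_meta = metas[i]
--
--     return metas
-- ===== SOURCE B (Python) =====
-- def fix_meta_sequence(metas):
--     prev = next((m for m in metas if m is not None), None)
--     for i in range(len(metas)):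
--         if metas[i] is None:
--             metas[i] = prev
--         else:
--             prev = metas[i]
--     return metas
-- ===== Notes on version B (the rewrite author's own statement) =====
-- stated objective: simpler
-- what changed: Replaces A's two directional fill passes (forward then backward) with one scan that precomputes the first non-None element and a single forward pass filling from it.
import Mathlib
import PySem

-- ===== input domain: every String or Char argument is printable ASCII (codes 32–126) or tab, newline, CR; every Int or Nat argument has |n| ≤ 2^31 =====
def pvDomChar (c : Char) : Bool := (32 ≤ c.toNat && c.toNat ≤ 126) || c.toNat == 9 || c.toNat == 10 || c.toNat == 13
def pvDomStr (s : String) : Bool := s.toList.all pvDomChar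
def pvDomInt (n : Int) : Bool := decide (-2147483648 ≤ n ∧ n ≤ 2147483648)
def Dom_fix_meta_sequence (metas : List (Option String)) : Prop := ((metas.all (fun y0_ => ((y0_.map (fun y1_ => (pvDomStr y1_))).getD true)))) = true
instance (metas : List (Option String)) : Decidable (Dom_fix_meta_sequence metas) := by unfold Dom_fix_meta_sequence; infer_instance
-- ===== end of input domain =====

-- B replaces A's two directional fill passes with one scan for the first non-None value plus a
-- single forward fill pass (objective: simpler). Both Pythons mutate `metas` in place and return
-- it; the equivalence proved here is about the return value (B performs the same mutation).

-- ===== PORT A =====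
-- one pass of A's loop: `if metas[i] is None: metas[i] = prev; prev = metas[i]`
def fwdFill (prev : Option String) : List (Option String) → List (Option String)
  | [] => []
  | x :: xs =>
    let y := if x.isNone then prev else x
    y :: fwdFill y xs

-- A: forward pass, then the same loop over indices len-1 … 0 (= reverse, pass, reverse back)
def fix_meta_sequence (metas : List (Option String)) : List (Option String) :=
  let l1 := fwdFill none metas
  (fwdFill none l1.reverse).reverse

-- ===== PORT B =====
-- next((m for m in metas if m is not None), None)
def firstSome : List (Option String) → Option String
  | [] => none
  | none :: xs => firstSome xs
  | some s :: _ => some s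

-- B's loop: `if metas[i] is None: metas[i] = prev  else: prev = metas[i]`
def fillWith (prev : Option String) : List (Option String) → List (Option String)
  | [] => []
  | none :: xs => prev :: fillWith prev xs
  | some s :: xs => some s :: fillWith (some s) xs

def fix_meta_sequence_alt (metas : List (Option String)) : List (Option String) :=
  fillWith (firstSome metas) metas

-- ===== PRECONDITION & SPEC =====
def Spec_fix_meta_sequence (metas : List (Option String)) (out : List (Option String)) : Prop := out = fix_meta_sequence_alt metas
instance (metas : List (Option String)) (out : List (Option String)) : Decidable (Spec_fix_meta_sequence metas out) := by unfold Spec_fix_meta_sequence; infer_instance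

-- ===== CLAIM (what is proved, stated in full; the proofs are below) =====
def Claim_equal_fix_meta_sequence : Prop := ∀ (metas : List (Option String)), Dom_fix_meta_sequence metas → Spec_fix_meta_sequence metas (fix_meta_sequence metas)

-- ===== LEMMAS AND PROOFS =====

-- A's loop body and B's loop body compute the same per-element update
theorem fwdFill_eq_fillWith (p : Option String) (l : List (Option String)) :
    fwdFill p l = fillWith p l := by
  induction l generalizing p with
  | nil => rfl
  | cons x xs ih => cases x <;> simp [fwdFill, fillWith, ih]

theorem fillWith_replicate_none (p : Option String) (k : Nat) (rest : List (Option String)) :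
    fillWith p (List.replicate k none ++ rest) = List.replicate k p ++ fillWith p rest := by
  induction k with
  | zero => simp
  | succ n ih => simp [List.replicate_succ, fillWith, ih]

theorem fillWith_allSome (s : String) (l : List (Option String)) :
    (fillWith (some s) l).all Option.isSome := by
  induction l generalizing s with
  | nil => rfl
  | cons x xs ih =>
    cases x <;>
      simp only [fillWith, List.all_cons, Option.isSome_some, Bool.true_and] <;> exact ih _

theorem fillWith_append_allSome (p : Option String) (l : List (Option String))
    (h : l.all Option.isSome) (s : String) (rest : List (Option String)) :
    fillWith p (l ++ some s :: rest) = l ++ some s :: fillWith (some s) rest := by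
  induction l generalizing p with
  | nil => simp [fillWith]
  | cons x xs ih =>
    cases x with
    | none => simp at h
    | some t => simp [fillWith, ih _ (by simpa using h)]

theorem firstSome_none (l : List (Option String)) (h : firstSome l = none) :
    l = List.replicate l.length none := by
  induction l with
  | nil => rfl
  | cons x xs ih =>
    cases x with
    | none => simp [List.replicate_succ]; exact ih (by simpa [firstSome] using h)
    | some s => simp [firstSome] at h

theorem firstSome_some (l : List (Option String)) (s : String) (h : firstSome l = some s) :
    ∃ k l', l = List.replicate k none ++ some s :: l' := by
  induction l with
  | nil => simp [firstSome] at h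
  | cons x xs ih =>
    cases x with
    | none =>
      obtain ⟨k, l', hk⟩ := ih (by simpa [firstSome] using h)
      exact ⟨k + 1, l', by simp [List.replicate_succ, hk]⟩
    | some t =>
      simp [firstSome] at h
      exact ⟨0, xs, by simp [h]⟩

-- ===== VERDICT (by name: the statement is the Claim_ definition above) =====
theorem fix_meta_sequence_spec : Claim_equal_fix_meta_sequence := by
  intro metas _
  unfold Spec_fix_meta_sequence fix_meta_sequence fix_meta_sequence_alt
  simp only [fwdFill_eq_fillWith]
  cases hf : firstSome metas with
  | none =>
    have hm := firstSome_none metas hf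
    rw [hm]
    generalize metas.length = n
    have h1 : fillWith none (List.replicate n (none : Option String)) = List.replicate n none := by
      simpa [fillWith] using fillWith_replicate_none none n []
    rw [h1, List.reverse_replicate, h1, List.reverse_replicate]
  | some s =>
    obtain ⟨k, l', rfl⟩ := firstSome_some metas s hf
    have h1 : fillWith none (List.replicate k none ++ some s :: l')
        = List.replicate k none ++ some s :: fillWith (some s) l' := by
      rw [fillWith_replicate_none]; rfl
    have h2 : fillWith (some s) (List.replicate k (none : Option String))
        = List.replicate k (some s) := by
      simpa [fillWith] using fillWith_replicate_none (some s) k []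
    rw [h1, fillWith_replicate_none]
    simp only [List.reverse_append, List.reverse_cons, List.reverse_replicate,
      List.append_assoc, List.cons_append, List.nil_append]
    rw [fillWith_append_allSome none _ (by simpa using fillWith_allSome s l') s _, h2]
    simp [fillWith]
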